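-- pv_equiv track=rewrite | github.com/redopxxxx-create/Netflix-Tv-Bot | main.py | create_button_layout
-- ===== SOURCE A (Python) =====
-- def create_button_layout(buttons):
--     layout = []
--     row = []
--     for i, button in enumerate(buttons):
--         row.append(button)
--         if len(row) == 2:
--             layout.append(row)
--             row = []
--     if row:
--         layout.append(row)
--     return layout
-- ===== SOURCE B (Python) =====
-- def create_button_layout(buttons):
--     return [buttons[i:i+2] for i in range(0, len(buttons), 2)]
-- ===== Notes on version B (the rewrite author's own statement) =====
-- stated objective: idiomatic
-- what changed: Replaces the per-element accumulator with its length-2 flush check and trailing-remainder append by a single slicing comprehension over index positions stepping by 2.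
import Mathlib
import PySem

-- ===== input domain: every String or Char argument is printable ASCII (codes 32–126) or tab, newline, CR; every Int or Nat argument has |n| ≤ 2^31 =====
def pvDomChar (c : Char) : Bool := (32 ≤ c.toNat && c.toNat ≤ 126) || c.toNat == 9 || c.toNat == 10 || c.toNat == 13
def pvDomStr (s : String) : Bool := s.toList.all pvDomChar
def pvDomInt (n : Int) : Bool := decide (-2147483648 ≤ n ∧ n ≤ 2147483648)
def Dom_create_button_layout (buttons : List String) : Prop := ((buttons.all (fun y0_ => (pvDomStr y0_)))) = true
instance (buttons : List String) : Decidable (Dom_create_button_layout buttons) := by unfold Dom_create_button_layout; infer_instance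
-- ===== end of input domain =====

-- B replaces A's accumulator/flush row building by an idiomatic stride-2 slicing comprehension.


-- ===== PORT A =====
-- for i, button in enumerate(buttons): row.append(button); if len(row)==2: layout.append(row); row=[]
def create_button_layout (buttons : List String) : List (List String) :=
  let st := (PySem.List.enumerate buttons 0).foldl
    (fun (st : List (List String) × List String) ib =>
      let row := st.2 ++ [ib.2]
      if row.length == 2 then (st.1 ++ [row], ([] : List String)) else (st.1, row))
    ([], [])
  if st.2 ≠ [] then st.1 ++ [st.2] else st.1

-- ===== PORT B =====
-- return [buttons[i:i+2] for i in range(0, len(buttons), 2)]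
def create_button_layout_alt (buttons : List String) : List (List String) :=
  (PySem.List.pyRange 0 (buttons.length : Int) 2).map
    (fun i => PySem.List.slice buttons (some i) (some (i + 2)))

-- ===== PRECONDITION & SPEC =====
def Spec_create_button_layout (buttons : List String) (out : List (List String)) : Prop := out = create_button_layout_alt buttons
instance (buttons : List String) (out : List (List String)) : Decidable (Spec_create_button_layout buttons out) := by unfold Spec_create_button_layout; infer_instance

-- ===== CLAIM (what is proved, stated in full; the proofs are below) =====
def Claim_equal_create_button_layout : Prop := ∀ (buttons : List String), Dom_create_button_layout buttons → Spec_create_button_layout buttons (create_button_layout buttons)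

-- ===== LEMMAS AND PROOFS =====

-- reference chunking: groups of two, trailing singleton kept
def pvChunk2 : List String → List (List String)
  | [] => []
  | [x] => [[x]]
  | a :: b :: t => [a, b] :: pvChunk2 t

def pvStepA (st : List (List String) × List String) (b : String) :
    List (List String) × List String :=
  let row := st.2 ++ [b]
  if row.length == 2 then (st.1 ++ [row], ([] : List String)) else (st.1, row)

lemma enumerate_foldl_eq (xs : List String) :
    ∀ (s : Int) (st : List (List String) × List String),
    (PySem.List.enumerate xs s).foldl
      (fun st ib =>
        let row := st.2 ++ [ib.2]
        if row.length == 2 then (st.1 ++ [row], ([] : List String)) else (st.1, row)) st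
    = xs.foldl pvStepA st := by
  induction xs with
  | nil => intro s st; simp [PySem.List.enumerate]
  | cons x xs ih =>
    intro s st
    have h : PySem.List.enumerate (x :: xs) s = (s, x) :: PySem.List.enumerate xs (s + 1) := by
      simp [PySem.List.enumerate]
    rw [h]
    simp only [List.foldl_cons]
    exact ih (s + 1) _

lemma foldlA_eq_chunk2 (xs : List String) :
    ∀ (acc : List (List String)),
    (if (xs.foldl pvStepA (acc, [])).2 ≠ [] then
        (xs.foldl pvStepA (acc, [])).1 ++ [(xs.foldl pvStepA (acc, [])).2]
     else (xs.foldl pvStepA (acc, [])).1) = acc ++ pvChunk2 xs := by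
  induction xs using pvChunk2.induct with
  | case1 => intro acc; simp [pvChunk2]
  | case2 x => intro acc; simp [pvChunk2, pvStepA]
  | case3 a b t ih =>
    intro acc
    have hstep : (a :: b :: t).foldl pvStepA (acc, []) = t.foldl pvStepA (acc ++ [[a, b]], []) := by
      simp [pvStepA]
    rw [hstep, ih (acc ++ [[a, b]])]
    simp [pvChunk2]

lemma rangeB_eq_chunk2 (xs : List String) :
    ∀ (m : Nat), m = (xs.length + 1) / 2 →
    (List.range m).map (fun k => (xs.drop (2 * k)).take 2) = pvChunk2 xs := by
  induction xs using pvChunk2.induct with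
  | case1 => intro m hm; simp at hm; simp [hm, pvChunk2]
  | case2 x =>
    intro m hm
    simp at hm
    subst hm
    simp [pvChunk2]
  | case3 a b t ih =>
    intro m hm
    have hm' : m = (t.length + 1) / 2 + 1 := by simp at hm; omega
    subst hm'
    rw [List.range_succ_eq_map]
    simp only [List.map_cons, List.map_map]
    have hhd : ((a :: b :: t).drop (2 * 0)).take 2 = [a, b] := by simp
    have htl : (List.range ((t.length + 1) / 2)).map
        ((fun k => ((a :: b :: t).drop (2 * k)).take 2) ∘ (fun k => k + 1))
        = pvChunk2 t := by
      rw [← ih ((t.length + 1) / 2) rfl]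
      apply List.map_congr_left
      intro k _
      have : 2 * (k + 1) = 2 * k + 2 := by ring
      simp [Function.comp, this, List.drop_succ_cons]
    rw [hhd, htl]
    rfl

lemma altB_eq_chunk2 (xs : List String) : create_button_layout_alt xs = pvChunk2 xs := by
  unfold create_button_layout_alt
  rw [PySem.List.pyRange_of_pos 0 (xs.length : Int) (by norm_num)]
  rw [List.map_map]
  rw [← rangeB_eq_chunk2 xs ((xs.length + 1) / 2) rfl]
  have hlen : (if (0 : Int) < (xs.length : Int) then
      (((xs.length : Int) - 0 + 2 - 1) / 2).toNat else 0) = (xs.length + 1) / 2 := by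
    split_ifs with h
    · omega
    · omega
  rw [hlen]
  apply List.map_congr_left
  intro k _
  have hc : (0 : Int) + 2 * (k : Int) = ((2 * k : Nat) : Int) := by push_cast; ring
  simp only [Function.comp]
  rw [hc]
  have hc2 : ((2 * k : Nat) : Int) + 2 = ((2 * k : Nat) : Int) + ((2 : Nat) : Int) := by norm_num
  rw [hc2, PySem.List.slice_natCast_add]

-- ===== VERDICT (by name: the statement is the Claim_ definition above) =====
theorem create_button_layout_spec : Claim_equal_create_button_layout := by
  intro buttons _
  unfold Spec_create_button_layout create_button_layout
  rw [altB_eq_chunk2]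
  have h1 := enumerate_foldl_eq buttons 0 ([], [])
  simp only [h1]
  have h2 := foldlA_eq_chunk2 buttons []
  simpa using h2
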